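-- pv_equiv track=rewrite | github.com/plaskod/ok | kopia.py | check
-- ===== SOURCE A (Python) =====
-- def check(graf,kolorowanie):
--     n=len(kolorowanie)
--     bledy=0
--     for i in range(n):
--         for j in range(i+1,n):
--             if (graf[i][j]==1 and kolorowanie[i]==kolorowanie[j]):
--                 bledy+=1
--     return bledy
-- ===== SOURCE B (Python) =====
-- def check(graf, kolorowanie):
--     # Group vertex indices by color, then only examine pairs inside each color class.
--     groups = {}
--     for idx, c in enumerate(kolorowanie):
--         groups.setdefault(c, []).append(idx)
--     bledy = 0
--     for idxs in groups.values():
--         bledy += _same_color_errors(graf, idxs)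
--     return bledy
--
-- def _same_color_errors(graf, idxs):
--     # Count edges among the (increasing) index list idxs.
--     total = 0
--     while idxs:
--         u, idxs = idxs[0], idxs[1:]
--         for v in idxs:
--             if graf[u][v] == 1:
--                 total += 1
--     return total
-- ===== Notes on version B (the rewrite author's own statement) =====
-- stated objective: alternative
-- what changed: Instead of scanning all upper-triangle index pairs, B builds a dict grouping vertex indices by color in one pass and then counts adjacent pairs only inside each color class.
import Mathlib
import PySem

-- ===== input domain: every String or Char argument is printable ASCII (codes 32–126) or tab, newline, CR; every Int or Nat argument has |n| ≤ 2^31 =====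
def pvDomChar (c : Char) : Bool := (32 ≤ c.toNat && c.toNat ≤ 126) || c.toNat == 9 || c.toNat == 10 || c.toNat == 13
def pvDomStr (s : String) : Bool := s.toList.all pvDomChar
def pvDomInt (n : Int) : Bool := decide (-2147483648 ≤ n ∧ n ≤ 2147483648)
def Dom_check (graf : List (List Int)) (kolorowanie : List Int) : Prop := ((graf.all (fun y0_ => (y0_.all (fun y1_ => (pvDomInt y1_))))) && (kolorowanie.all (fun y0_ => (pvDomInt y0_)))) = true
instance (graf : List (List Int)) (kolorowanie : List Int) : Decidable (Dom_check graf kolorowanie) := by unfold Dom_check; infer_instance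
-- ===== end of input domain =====

-- B groups vertex indices by color (one dict pass) and counts edges only inside each
-- color class — a different decomposition of the same count (return value only; no mutation).

-- ===== PORT A =====
def check (graf : List (List Int)) (kolorowanie : List Int) : Int :=
  let n := PySem.List.len kolorowanie
  (PySem.List.pyRange 0 n 1).foldl (fun bledy i =>
    (PySem.List.pyRange (i + 1) n 1).foldl (fun bledy j =>
      if PySem.List.pyGetD (PySem.List.pyGetD graf i []) j 0 = 1 ∧
          PySem.List.pyGetD kolorowanie i 0 = PySem.List.pyGetD kolorowanie j 0
      then bledy + 1 else bledy) bledy) 0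

-- ===== PORT B =====
-- the 'while idxs:' loop of _same_color_errors: pop the head, scan the rest
def sceLoop (graf : List (List Int)) : List Int → Int → Int
  | [], total => total
  | u :: rest, total =>
      sceLoop graf rest (rest.foldl (fun t v =>
        if PySem.List.pyGetD (PySem.List.pyGetD graf u []) v 0 = 1 then t + 1 else t) total)

def sameColorErrors (graf : List (List Int)) (idxs : List Int) : Int := sceLoop graf idxs 0

def check_alt (graf : List (List Int)) (kolorowanie : List Int) : Int :=
  let groups := (PySem.List.enumerate kolorowanie).foldl
    (fun g p => g.insert p.2 (g.getD p.2 [] ++ [p.1]))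
    (PySem.Dict.empty (κ := Int) (ν := List Int))
  groups.values.foldl (fun bledy idxs => bledy + sameColorErrors graf idxs) 0

-- ===== PRECONDITION & SPEC =====
-- Pre_check: exactly the inputs on which Python A returns (every row it touches is long enough).
def Pre_check (graf : List (List Int)) (kolorowanie : List Int) : Prop :=
  ∀ i : ℕ, i < kolorowanie.length - 1 →
    i < graf.length ∧ kolorowanie.length ≤ (graf.getD i []).length
instance (graf : List (List Int)) (kolorowanie : List Int) : Decidable (Pre_check graf kolorowanie) := by
  unfold Pre_check; infer_instance

def pvWitness_check : List (List Int) × List Int := ([[0, 1], [1, 0]], [0, 0])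

def Spec_check (graf : List (List Int)) (kolorowanie : List Int) (out : Int) : Prop := out = check_alt graf kolorowanie
instance (graf : List (List Int)) (kolorowanie : List Int) (out : Int) : Decidable (Spec_check graf kolorowanie out) := by unfold Spec_check; infer_instance

-- ===== CLAIM (what is proved, stated in full; the proofs are below) =====
def Claim_equal_check : Prop := ∀ (graf : List (List Int)) (kolorowanie : List Int), Dom_check graf kolorowanie → Pre_check graf kolorowanie → Spec_check graf kolorowanie (check graf kolorowanie)

-- ===== LEMMAS AND PROOFS =====

-- the edge test of B, as a Bool
def pB (graf : List (List Int)) (u v : Int) : Bool :=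
  decide (PySem.List.pyGetD (PySem.List.pyGetD graf u []) v 0 = 1)

-- number of monochromatic edges (u, v) with u in the class, v = the new vertex — per color class
def pairsSum (graf : List (List Int)) : List Int → Int
  | [] => 0
  | u :: rest => ((rest.countP (fun v => pB graf u v) : ℕ) : Int) + pairsSum graf rest

-- the color class of c: positions of kol holding c, in order
def grpOf (kol : List Int) (c : Int) : List Int :=
  ((PySem.List.enumerate kol).filter (fun p => p.2 == c)).map (fun p => p.1)

-- column increment: monochromatic edges from vertices < m into vertex m
def colInc (graf : List (List Int)) (ys : List Int) (m : ℕ) : Int :=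
  ((PySem.List.pyRange 0 (m : Int) 1).map (fun i =>
    if PySem.List.pyGetD (PySem.List.pyGetD graf i []) (m : Int) 0 = 1 ∧
        PySem.List.pyGetD ys i 0 = PySem.List.pyGetD ys (m : Int) 0
    then (1 : Int) else 0)).sum

def colS (graf : List (List Int)) (ys : List Int) : ℕ → Int
  | 0 => 0
  | m + 1 => colS graf ys m + colInc graf ys m

def rowFold (graf : List (List Int)) (ys : List Int) (m : ℕ) : Int :=
  (PySem.List.pyRange 0 (m : Int) 1).foldl (fun bledy i =>
    (PySem.List.pyRange (i + 1) (m : Int) 1).foldl (fun bledy j =>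
      if PySem.List.pyGetD (PySem.List.pyGetD graf i []) j 0 = 1 ∧
          PySem.List.pyGetD ys i 0 = PySem.List.pyGetD ys j 0
      then bledy + 1 else bledy) bledy) 0

lemma check_eq_rowFold (graf : List (List Int)) (kol : List Int) :
    check graf kol = rowFold graf kol kol.length := by
  unfold check rowFold
  rw [PySem.List.len_eq]

lemma sceLoop_eq (graf : List (List Int)) (L : List Int) :
    ∀ t, sceLoop graf L t = t + pairsSum graf L := by
  induction L with
  | nil => intro t; simp [sceLoop, pairsSum]
  | cons u rest ih =>
      intro t
      simp only [sceLoop, pairsSum, ih,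
        PySem.List.foldl_ite_add_one (fun v => PySem.List.pyGetD (PySem.List.pyGetD graf u []) v 0 = 1)]
      simp [pB]
      ring

lemma pairsSum_append (graf : List (List Int)) (L : List Int) (x : Int) :
    pairsSum graf (L ++ [x]) = pairsSum graf L + ((L.countP (fun u => pB graf u x) : ℕ) : Int) := by
  induction L with
  | nil => simp [pairsSum]
  | cons u L ih =>
      simp only [List.cons_append, pairsSum, ih, List.countP_append, List.countP_cons]
      push_cast
      by_cases h : pB graf u x = true <;> simp [h] <;> ring

lemma grpOf_eq_range (kol : List Int) (c : Int) :
    grpOf kol c = (PySem.List.pyRange 0 (kol.length : Int) 1).filter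
      (fun j => PySem.List.pyGetD kol j 0 == c) := by
  rw [grpOf, PySem.List.enumerate_eq_map_pyRange kol 0, List.filter_map, List.map_map]
  simp [Function.comp_def]

lemma sum_map_update (f f' : Int → Int) (S : List Int) (y : Int) (hnd : S.Nodup) (hy : y ∈ S)
    (hagree : ∀ c ∈ S, c ≠ y → f' c = f c) :
    (S.map f').sum = (S.map f).sum + (f' y - f y) := by
  induction S with
  | nil => cases hy
  | cons a S ih =>
      rcases List.mem_cons.mp hy with rfl | hyS
      · have : ∀ c ∈ S, f' c = f c := by
          intro c hc
          exact hagree c (List.mem_cons_of_mem _ hc) (fun h => (List.nodup_cons.mp hnd).1 (h ▸ hc))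
        simp [List.map_congr_left this]; ring
      · have ha : f' a = f a :=
          hagree a List.mem_cons_self (fun h => (List.nodup_cons.mp hnd).1 (h ▸ hyS))
        have := ih (List.nodup_cons.mp hnd).2 hyS
          (fun c hc hcy => hagree c (List.mem_cons_of_mem _ hc) hcy)
        simp [this, ha]; ring

lemma pyGetD_append_lt (xs ys : List Int) (i : Int) (h0 : 0 ≤ i) (h : i < xs.length) :
    PySem.List.pyGetD (xs ++ ys) i 0 = PySem.List.pyGetD xs i 0 := by
  rw [PySem.List.pyGetD_of_nonneg _ _ h0, PySem.List.pyGetD_of_nonneg _ _ h0]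
  exact List.getD_append _ _ _ _ (by omega)

lemma pyGetD_append_self (xs : List Int) (y : Int) :
    PySem.List.pyGetD (xs ++ [y]) (xs.length : Int) 0 = y := by
  simp [PySem.List.pyGetD_natCast]

lemma colInc_append (graf : List (List Int)) (zs : List Int) (y : Int) (m : ℕ) (hm : m < zs.length) :
    colInc graf (zs ++ [y]) m = colInc graf zs m := by
  unfold colInc
  refine congrArg _ (List.map_congr_left ?_)
  intro i hi
  have hi' := PySem.List.mem_pyRange_one.mp hi
  have h1 : PySem.List.pyGetD (zs ++ [y]) i 0 = PySem.List.pyGetD zs i 0 :=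
    pyGetD_append_lt zs [y] i hi'.1 (by exact_mod_cast lt_trans hi'.2 (by exact_mod_cast hm))
  have h2 : PySem.List.pyGetD (zs ++ [y]) (m : Int) 0 = PySem.List.pyGetD zs (m : Int) 0 :=
    pyGetD_append_lt zs [y] m (by positivity) (by exact_mod_cast hm)
  rw [h1, h2]

lemma colS_append (graf : List (List Int)) (zs : List Int) (y : Int) :
    ∀ m : ℕ, m ≤ zs.length → colS graf (zs ++ [y]) m = colS graf zs m := by
  intro m
  induction m with
  | zero => intro _; rfl
  | succ k ih =>
      intro hk
      simp only [colS, ih (by omega), colInc_append graf zs y k (by omega)]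

lemma rowFold_succ (graf : List (List Int)) (ys : List Int) (m : ℕ) :
    rowFold graf ys (m + 1) = rowFold graf ys m + colInc graf ys m := by
  unfold rowFold colInc
  simp only [PySem.List.foldl_ite_add_one, PySem.List.foldl_add, zero_add]
  push_cast
  rw [PySem.List.pyRange_one_succ_right (by positivity : (0 : ℤ) ≤ (m : ℤ)),
    List.map_append, List.sum_append]
  have hlast : ((PySem.List.pyRange ((m : ℤ) + 1) ((m : ℤ) + 1) 1).countP
      (fun j => decide (PySem.List.pyGetD (PySem.List.pyGetD graf (m : ℤ) []) j 0 = 1 ∧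
        PySem.List.pyGetD ys (m : ℤ) 0 = PySem.List.pyGetD ys j 0)) : ℤ) = 0 := by
    rw [PySem.List.pyRange_one_eq_nil le_rfl]; simp
  have hpt : ∀ i ∈ PySem.List.pyRange 0 (m : ℤ) 1,
      (((PySem.List.pyRange (i + 1) ((m : ℤ) + 1) 1).countP
        (fun j => decide (PySem.List.pyGetD (PySem.List.pyGetD graf i []) j 0 = 1 ∧
          PySem.List.pyGetD ys i 0 = PySem.List.pyGetD ys j 0)) : ℕ) : ℤ) =
      (((PySem.List.pyRange (i + 1) (m : ℤ) 1).countP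
        (fun j => decide (PySem.List.pyGetD (PySem.List.pyGetD graf i []) j 0 = 1 ∧
          PySem.List.pyGetD ys i 0 = PySem.List.pyGetD ys j 0)) : ℕ) : ℤ) +
      (if PySem.List.pyGetD (PySem.List.pyGetD graf i []) (m : ℤ) 0 = 1 ∧
          PySem.List.pyGetD ys i 0 = PySem.List.pyGetD ys (m : ℤ) 0 then (1 : ℤ) else 0) := by
    intro i hi
    have hi' := PySem.List.mem_pyRange_one.mp hi
    rw [PySem.List.pyRange_one_succ_right (by omega : i + 1 ≤ (m : ℤ)), List.countP_append]
    push_cast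
    simp [List.countP_cons]
  rw [List.map_congr_left hpt, PySem.List.sum_map_add_int]
  simp only [List.map_cons, List.map_nil, List.sum_cons, List.sum_nil, hlast]
  ring

lemma rowFold_eq_colS (graf : List (List Int)) (ys : List Int) :
    ∀ m : ℕ, rowFold graf ys m = colS graf ys m := by
  intro m
  induction m with
  | zero => simp [rowFold, colS, PySem.List.pyRange_one_eq_nil]
  | succ k ih => rw [rowFold_succ, ih]; rfl

lemma groups_getD (kol : List Int) (c : Int) :
    (((PySem.List.enumerate kol).foldl
      (fun g p => g.insert p.2 (g.getD p.2 [] ++ [p.1]))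
      (PySem.Dict.empty (κ := Int) (ν := List Int))).getD c []) = grpOf kol c := by
  have h1 : ((PySem.List.enumerate kol).foldl
      (fun g p => g.insert p.2 (g.getD p.2 [] ++ [p.1]))
      (PySem.Dict.empty (κ := Int) (ν := List Int))) =
      (((PySem.List.enumerate kol).map (fun p => (p.2, p.1))).foldl
        (fun d p => d.modify p.1 [] (· ++ [p.2])) PySem.Dict.empty) := by
    rw [List.foldl_map]; rfl
  rw [h1, PySem.Dict.getD_foldl_modify_append]
  simp [grpOf, List.filter_map, List.map_map, Function.comp_def]

lemma groups_keys (kol : List Int) :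
    ((PySem.List.enumerate kol).foldl
      (fun g p => g.insert p.2 (g.getD p.2 [] ++ [p.1]))
      (PySem.Dict.empty (κ := Int) (ν := List Int))).keys = PySem.Set.ofList kol := by
  rw [show (fun (g : PySem.Dict Int (List Int)) (p : Int × Int) => g.insert p.2 (g.getD p.2 [] ++ [p.1])) =
      (fun g p => g.modify ((fun q : Int × Int => q.2) p) []
        ((fun (_ : PySem.Dict Int (List Int)) (q : Int × Int) (v : List Int) => v ++ [q.1]) g p)) from rfl,
    PySem.Dict.keys_foldl_modify_key]
  simp [PySem.Set.update_nil_left, PySem.List.map_snd_enumerate]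

lemma groups_nodup (kol : List Int) :
    ((PySem.List.enumerate kol).foldl
      (fun g p => g.insert p.2 (g.getD p.2 [] ++ [p.1]))
      (PySem.Dict.empty (κ := Int) (ν := List Int))).keys.Nodup := by
  exact PySem.Dict.nodup_keys_foldl_modify_key _ (fun q : Int × Int => q.2) []
    (fun _ q v => v ++ [q.1]) _ (by simp [PySem.Dict.keys_empty])

lemma check_alt_eq_sum (graf : List (List Int)) (kol : List Int) :
    check_alt graf kol =
      ((PySem.Set.ofList kol).map (fun c => pairsSum graf (grpOf kol c))).sum := by
  unfold check_alt
  rw [PySem.List.foldl_add, PySem.Dict.values_eq_map_keys _ (groups_nodup kol) ([] : List Int),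
    groups_keys, List.map_map]
  refine (zero_add _).trans (congrArg _ (List.map_congr_left ?_))
  intro c _
  simp only [Function.comp_apply, groups_getD, sameColorErrors, sceLoop_eq, zero_add]

lemma grpOf_append (zs : List Int) (y c : Int) :
    grpOf (zs ++ [y]) c = grpOf zs c ++ (if y == c then [(zs.length : Int)] else []) := by
  unfold grpOf
  rw [PySem.List.enumerate_append]
  simp only [List.filter_append, List.map_append]
  congr 1
  by_cases h : y == c <;> simp [PySem.List.enumerate_cons, h]

lemma grpOf_nil_of_not_mem (zs : List Int) (y : Int) (hy : y ∉ zs) : grpOf zs y = [] := by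
  rw [grpOf, List.map_eq_nil_iff, List.filter_eq_nil_iff]
  intro p hp
  rcases (PySem.List.mem_enumerate_iff zs 0 p).mp hp with ⟨k, hk, rfl⟩
  simp only [beq_iff_eq]
  intro h
  exact hy (h ▸ List.getElem_mem hk)

lemma colInc_eq_group_count (graf : List (List Int)) (zs : List Int) (y : Int) :
    colInc graf (zs ++ [y]) zs.length =
      (((grpOf zs y).countP (fun u => pB graf u (zs.length : Int)) : ℕ) : Int) := by
  rw [grpOf_eq_range, List.countP_filter]
  unfold colInc
  have hpt : ∀ i ∈ PySem.List.pyRange 0 (zs.length : ℤ) 1,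
      (if PySem.List.pyGetD (PySem.List.pyGetD graf i []) (zs.length : ℤ) 0 = 1 ∧
          PySem.List.pyGetD (zs ++ [y]) i 0 = PySem.List.pyGetD (zs ++ [y]) (zs.length : ℤ) 0
        then (1 : ℤ) else 0) =
      (if (pB graf i (zs.length : ℤ) && (PySem.List.pyGetD zs i 0 == y)) = true
        then (1 : ℤ) else 0) := by
    intro i hi
    have hi' := PySem.List.mem_pyRange_one.mp hi
    rw [pyGetD_append_lt zs [y] i hi'.1 hi'.2, pyGetD_append_self]
    simp [pB, Bool.and_eq_true, decide_eq_true_eq]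
  rw [List.map_congr_left hpt, PySem.List.sum_map_ite_one_zero]

lemma main_sum (graf : List (List Int)) (ys : List Int) :
    ((PySem.Set.ofList ys).map (fun c => pairsSum graf (grpOf ys c))).sum =
      colS graf ys ys.length := by
  induction ys using List.reverseRecOn with
  | nil => simp [colS]
  | append_singleton zs y ih =>
      have hlen : (zs ++ [y]).length = zs.length + 1 := by simp
      rw [hlen]
      show _ = colS graf (zs ++ [y]) zs.length + colInc graf (zs ++ [y]) zs.length
      rw [colS_append graf zs y zs.length le_rfl, PySem.Set.ofList_append_singleton]
      by_cases hy : y ∈ zs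
      · have hmem : y ∈ PySem.Set.ofList zs := (PySem.Set.mem_ofList zs y).mpr hy
        rw [PySem.Set.add_of_mem hmem]
        rw [sum_map_update (fun c => pairsSum graf (grpOf zs c))
          (fun c => pairsSum graf (grpOf (zs ++ [y]) c)) _ y (PySem.Set.nodup_ofList zs) hmem
          (by
            intro c _ hcy
            simp only [grpOf_append zs y c]
            rw [if_neg (by simpa using (Ne.symm hcy)), List.append_nil])]
        rw [ih, colInc_eq_group_count]
        have : pairsSum graf (grpOf (zs ++ [y]) y) =
            pairsSum graf (grpOf zs y) +
            (((grpOf zs y).countP (fun u => pB graf u (zs.length : Int)) : ℕ) : Int) := by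
          rw [grpOf_append zs y y, if_pos (by simp), pairsSum_append]
        rw [this]; ring
      · have hnm : y ∉ PySem.Set.ofList zs := fun h => hy ((PySem.Set.mem_ofList zs y).mp h)
        rw [PySem.Set.add_of_not_mem hnm, List.map_append, List.sum_append]
        have h1 : (PySem.Set.ofList zs).map (fun c => pairsSum graf (grpOf (zs ++ [y]) c)) =
            (PySem.Set.ofList zs).map (fun c => pairsSum graf (grpOf zs c)) := by
          refine List.map_congr_left ?_
          intro c hc
          have hcy : c ≠ y := fun h => hy (h ▸ (PySem.Set.mem_ofList zs c).mp hc)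
          simp only [grpOf_append zs y c]
          rw [if_neg (by simpa using (Ne.symm hcy)), List.append_nil]
        have h2 : pairsSum graf (grpOf (zs ++ [y]) y) = 0 := by
          rw [grpOf_append zs y y, if_pos (by simp), grpOf_nil_of_not_mem zs y hy]
          simp [pairsSum]
        have h3 : colInc graf (zs ++ [y]) zs.length = 0 := by
          rw [colInc_eq_group_count, grpOf_nil_of_not_mem zs y hy]; simp
        rw [h1, ih, h3]
        simp [h2]

-- ===== VERDICT (by name: the statement is the Claim_ definition above) =====
theorem check_spec : Claim_equal_check := by
  intro graf kol _ _
  unfold Spec_check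
  rw [check_eq_rowFold, rowFold_eq_colS, check_alt_eq_sum, main_sum]
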